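-- pv_equiv track=rewrite | github.com/mnghiap/oa-practice | find_maximum_maximumcount.py | find_maximum_maximumcount
-- ===== SOURCE A (Python) =====
-- def find_maximum_maximumcount(categories):
--     chars = set(categories)
--     count = {char: 0 for char in chars}
--     max_count = {char: 0 for char in chars}
--     for i, char in enumerate(categories):
--         count[char] += 1
--         max_chars = [char for char in max_count if count[char] == max(count.values())]
--         for max_char in max_chars:
--             max_count[max_char] += 1
--     return max(max_count.values())
-- ===== SOURCE B (Python) =====
-- def find_maximum_maximumcount(categories):
--     # Pass 1: per-category counts plus the running maximum count after each position.
--     counts = {}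
--     m = 0
--     ms = []
--     for ch in categories:
--         c = counts.get(ch, 0) + 1
--         counts[ch] = c
--         if c > m:
--             m = c
--         ms.append(m)
--
--     # Pass 2: for each category, count the positions where its prefix count
--     # equals the running maximum at that position.
--     def tally(c):
--         pc = 0
--         t = 0
--         for ch, mi in zip(categories, ms):
--             if ch == c:
--                 pc += 1
--             if pc == mi:
--                 t += 1
--         return t
--
--     return max(tally(c) for c in counts)
-- ===== Notes on version B (the rewrite author's own statement) =====
-- stated objective: faster
-- what changed: Replaces A's per-step dict scan with recomputed max (max(count.values()) evaluated once per key per step) by a two-pass algorithm: one pass building per-category counts and an array of running maxima, then one tally pass per distinct category.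
import Mathlib
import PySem

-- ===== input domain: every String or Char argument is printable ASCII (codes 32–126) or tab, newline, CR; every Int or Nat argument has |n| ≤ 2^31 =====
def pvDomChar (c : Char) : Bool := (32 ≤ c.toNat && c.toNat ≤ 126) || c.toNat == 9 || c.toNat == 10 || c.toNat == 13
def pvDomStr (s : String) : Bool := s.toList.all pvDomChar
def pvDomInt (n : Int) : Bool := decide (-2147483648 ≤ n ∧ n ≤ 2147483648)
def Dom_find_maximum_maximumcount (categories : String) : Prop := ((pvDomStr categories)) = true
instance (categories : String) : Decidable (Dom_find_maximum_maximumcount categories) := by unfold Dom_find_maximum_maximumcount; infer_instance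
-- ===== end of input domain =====

-- B replaces A's per-step rescan (max(count.values()) recomputed for every key at every
-- step) by two passes: a running-maximum array plus one tally pass per distinct category.
-- Set/dict iteration order is modelled as first-occurrence order; A only reads dict
-- values afterwards (max of values), so its result does not depend on that order.

-- ===== PORT A =====
-- loop body of 'for i, char in enumerate(categories)' (the index i is unused)
def pvStepA (st : PySem.Dict Char Int × PySem.Dict Char Int) (ch : Char) :
    PySem.Dict Char Int × PySem.Dict Char Int :=
  let count := st.1.modify ch 0 (· + 1)
  let max_chars := st.2.keys.filter
    (fun c => count.getD c 0 == (PySem.List.max? count.values (fun v => v)).getD 0)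
  (count, max_chars.foldl (fun d c => d.modify c 0 (· + 1)) st.2)

-- 'max_chars' uses count.values, nonempty inside the loop, so its '.getD 0' is unreachable;
-- the final max() raises ValueError on the empty dict: Pre_ excludes ""
def find_maximum_maximumcount (categories : String) : Int :=
  let chars : PySem.Set Char := PySem.Set.ofList categories.toList
  let count : PySem.Dict Char Int := chars.foldl (fun d c => d.insert c 0) PySem.Dict.empty
  let max_count : PySem.Dict Char Int := chars.foldl (fun d c => d.insert c 0) PySem.Dict.empty
  let st := (PySem.List.enumerate categories.toList 0).foldl
    (fun st ic => pvStepA st ic.2) (count, max_count)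
  (PySem.List.max? st.2.values (fun v => v)).getD 0

-- ===== PORT B =====
-- pass-1 loop body: counts[ch] = counts.get(ch,0)+1; m updated; ms.append(m)
def pvStepB1 (st : PySem.Dict Char Int × Int × List Int) (ch : Char) :
    PySem.Dict Char Int × Int × List Int :=
  let c := st.1.getD ch 0 + 1
  let counts := st.1.insert ch c
  let m := if c > st.2.1 then c else st.2.1
  (counts, m, st.2.2 ++ [m])

-- body of tally's loop over zip(categories, ms); state (pc, t)
def pvStepB2 (c : Char) (pt : Int × Int) (p : Char × Int) : Int × Int :=
  let pc := if p.1 == c then pt.1 + 1 else pt.1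
  let t := if pc == p.2 then pt.2 + 1 else pt.2
  (pc, t)

def pvTallyB (categories : List Char) (ms : List Int) (c : Char) : Int :=
  ((categories.zip ms).foldl (pvStepB2 c) (0, 0)).2

-- max(tally(c) for c in counts); max() raises on empty: Pre_ excludes ""
def find_maximum_maximumcount_alt (categories : String) : Int :=
  let st := categories.toList.foldl pvStepB1 (PySem.Dict.empty, 0, [])
  (PySem.List.max? (st.1.keys.map (pvTallyB categories.toList st.2.2)) (fun v => v)).getD 0

-- ===== PRECONDITION & SPEC =====
-- Python A raises ValueError (max() of an empty sequence) exactly on the empty string.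
def Pre_find_maximum_maximumcount (categories : String) : Prop := categories.toList ≠ []
instance (categories : String) : Decidable (Pre_find_maximum_maximumcount categories) := by
  unfold Pre_find_maximum_maximumcount; infer_instance
def pvWitness_find_maximum_maximumcount : String := "abcbb"

def Spec_find_maximum_maximumcount (categories : String) (out : Int) : Prop :=
  out = find_maximum_maximumcount_alt categories
instance (categories : String) (out : Int) : Decidable (Spec_find_maximum_maximumcount categories out) := by
  unfold Spec_find_maximum_maximumcount; infer_instance

-- ===== CLAIM (what is proved, stated in full; the proofs are below) =====
def Claim_equal_find_maximum_maximumcount : Prop := ∀ (categories : String), Dom_find_maximum_maximumcount categories → Pre_find_maximum_maximumcount categories → Spec_find_maximum_maximumcount categories (find_maximum_maximumcount categories)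

-- ===== LEMMAS AND PROOFS =====

lemma pv_beq_decide (a b : Int) : (a == b) = decide (a = b) := by
  by_cases h : a = b <;> simp [h]

lemma pv_foldl_max_assoc (L : List Int) (a b : Int) :
    L.foldl max (max a b) = max a (L.foldl max b) := by
  induction L generalizing b with
  | nil => rfl
  | cons x t ih => simpa [List.foldl, max_assoc] using ih (max b x)

lemma pv_max_getD_nonneg (L : List Int) (h : L ≠ []) (h0 : ∀ v ∈ L, 0 ≤ v) :
    (PySem.List.max? L (fun v => v)).getD 0 = L.foldl max 0 := by
  match L with
  | x :: t =>
    rw [PySem.List.max?_id_cons]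
    have hx : 0 ≤ x := h0 x (by simp)
    simp [List.foldl, max_eq_right hx]

lemma xmapupd (ks : List Char) (hnd : ks.Nodup) (f : Char → Int) (x : Char) (hx : x ∈ ks) :
    (ks.map (fun c => if c = x then f x + 1 else f c)).foldl max 0
      = max ((ks.map f).foldl max 0) (f x + 1) := by
  induction ks with
  | nil => cases hx
  | cons a t ih =>
    rcases List.nodup_cons.mp hnd with ⟨hat, hndt⟩
    by_cases hax : a = x
    · subst hax
      have hmap : t.map (fun c => if c = a then f a + 1 else f c) = t.map f := by
        apply List.map_congr_left
        intro c hc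
        have : c ≠ a := fun hca => hat (hca ▸ hc)
        simp [this]
      simp only [List.map_cons, List.foldl_cons, hmap, ite_true]
      have e1 : max 0 (f a + 1) = max (f a + 1) 0 := max_comm _ _
      have e2 : max 0 (f a) = max (f a) 0 := max_comm _ _
      rw [e1, e2, pv_foldl_max_assoc, pv_foldl_max_assoc]
      omega
    · have hxt : x ∈ t := by
        rcases List.mem_cons.mp hx with h | h
        · exact absurd h.symm hax
        · exact h
      simp only [List.map_cons, List.foldl_cons, if_neg hax]
      have e2 : max 0 (f a) = max (f a) 0 := max_comm _ _
      rw [e2, pv_foldl_max_assoc, pv_foldl_max_assoc, ih hndt hxt]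
      omega

def pvMV (cs q : List Char) : Int :=
  ((PySem.Set.ofList cs).map (fun c => (q.count c : Int))).foldl max 0

def pvT (cs p : List Char) (c : Char) : Int :=
  ((List.range p.length).countP
    (fun i => decide (((p.take (i + 1)).count c : Int) = pvMV cs (p.take (i + 1)))) : Nat)

lemma pvMV_append (cs q : List Char) (x : Char) (hx : x ∈ cs) :
    pvMV cs (q ++ [x]) = max (pvMV cs q) ((q.count x : Int) + 1) := by
  unfold pvMV
  have hmap : (PySem.Set.ofList cs).map (fun c => ((q ++ [x]).count c : Int))
      = (PySem.Set.ofList cs).map (fun c => if c = x then (q.count x : Int) + 1 else (q.count c : Int)) := by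
    apply List.map_congr_left
    intro c _
    by_cases hcx : c = x
    · subst hcx; simp [List.count_append]
    · simp [List.count_append, hcx, Ne.symm hcx]
  rw [hmap, xmapupd _ (PySem.Set.nodup_ofList cs) (fun c => (q.count c : Int)) x ((PySem.Set.mem_ofList _ _).mpr hx)]

lemma pvMV_pos (cs q : List Char) (x : Char) (hx : x ∈ cs) :
    ((q ++ [x]).count x : Int) ≤ pvMV cs (q ++ [x]) := by
  unfold pvMV
  have h := (PySem.List.le_foldl_max_int (PySem.Set.ofList cs) (fun c => (((q ++ [x]).count c : Nat) : Int)) 0).2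
  rw [List.foldl_map]
  exact h x ((PySem.Set.mem_ofList _ _).mpr hx)

lemma pvT_append (cs p : List Char) (x : Char) (c : Char) :
    pvT cs (p ++ [x]) c
      = pvT cs p c + (if ((p ++ [x]).count c : Int) = pvMV cs (p ++ [x]) then 1 else 0) := by
  unfold pvT
  have hlen : (p ++ [x]).length = p.length + 1 := by simp
  rw [hlen, List.range_succ, List.countP_append]
  have htake : ∀ i ∈ List.range p.length,
      (p ++ [x]).take (i + 1) = p.take (i + 1) := by
    intro i hi
    rw [List.mem_range] at hi
    exact List.take_append_of_le_length (by omega)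
  have h1 : (List.range p.length).countP
        (fun i => decide ((((p ++ [x]).take (i + 1)).count c : Int) = pvMV cs ((p ++ [x]).take (i + 1))))
      = (List.range p.length).countP
        (fun i => decide (((p.take (i + 1)).count c : Int) = pvMV cs (p.take (i + 1)))) := by
    apply List.countP_congr
    intro i hi
    rw [htake i hi]
  rw [h1]
  have h2 : (p ++ [x]).take (p.length + 1) = p ++ [x] := by
    apply List.take_of_length_le; simp
  simp only [List.countP_cons, List.countP_nil, h2]
  simp

lemma pv_set_update_of_subset (s : PySem.Set Char) (l : List Char) (h : ∀ x ∈ l, x ∈ s) :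
    PySem.Set.update s l = s := by
  induction l generalizing s with
  | nil => rfl
  | cons a t ih =>
    have hadd : PySem.Set.add s a = s := by
      simp [PySem.Set.add, PySem.Set.contains, h a (by simp)]
    have h1 : PySem.Set.update s (a :: t) = PySem.Set.update (PySem.Set.add s a) t := rfl
    rw [h1, hadd, ih s (fun x hx => h x (List.mem_cons_of_mem _ hx))]

lemma pvA_inv (cs : List Char) : ∀ (r p : List Char), cs = p ++ r →
    ∀ (dc dm : PySem.Dict Char Int),
    dc.keys = PySem.Set.ofList cs → dm.keys = PySem.Set.ofList cs →
    (∀ c, dc.getD c 0 = (p.count c : Int)) → (∀ c, dm.getD c 0 = pvT cs p c) →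
    (r.foldl pvStepA (dc, dm)).2.keys = PySem.Set.ofList cs ∧
      (∀ c, (r.foldl pvStepA (dc, dm)).2.getD c 0 = pvT cs (p ++ r) c) := by
  intro r
  induction r with
  | nil =>
    intro p hps dc dm hkc hkm hvc hvm
    simpa using ⟨hkm, fun c => by simpa using hvm c⟩
  | cons x r' ih =>
    intro p hps dc dm hkc hkm hvc hvm
    have hxcs : x ∈ cs := by rw [hps]; simp
    have hK : (PySem.Set.ofList cs).Nodup := PySem.Set.nodup_ofList cs
    -- the updated count dict
    set count' := dc.modify x 0 (· + 1) with hcount'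
    have hc' : ∀ c, count'.getD c 0 = (((p ++ [x]).count c : Nat) : Int) := by
      intro c
      rw [hcount', PySem.Dict.getD_modify]
      by_cases hcx : c = x
      · subst hcx; rw [hvc c]; simp [List.count_append]
      · rw [hvc c]; simp [List.count_append, hcx, Ne.symm hcx]
    have hkeys' : count'.keys = PySem.Set.ofList cs := by
      rw [hcount', PySem.Dict.keys_modify]
      rw [PySem.Dict.keys_insert_of_contains dc _ (by
        rw [PySem.Dict.contains_iff_mem_keys, hkc, PySem.Set.mem_ofList]; exact hxcs)]
      exact hkc
    have hvals : count'.values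
        = (PySem.Set.ofList cs).map (fun c => (((p ++ [x]).count c : Nat) : Int)) := by
      rw [PySem.Dict.values_eq_map_keys count' (hkeys' ▸ hK) 0, hkeys']
      exact List.map_congr_left (fun c _ => hc' c)
    have hKne : (PySem.Set.ofList cs).map (fun c => (((p ++ [x]).count c : Nat) : Int)) ≠ [] := by
      have : x ∈ PySem.Set.ofList cs := (PySem.Set.mem_ofList _ _).mpr hxcs
      intro hnil
      rw [List.map_eq_nil_iff] at hnil
      rw [hnil] at this
      cases this
    have hmax : (PySem.List.max? count'.values (fun v => v)).getD 0 = pvMV cs (p ++ [x]) := by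
      rw [hvals, pv_max_getD_nonneg _ hKne (by intro v hv; simp at hv; obtain ⟨c, _, hc⟩ := hv; omega)]
      rfl
    -- max_chars characterised
    have hfilter : dm.keys.filter
        (fun c => count'.getD c 0 == (PySem.List.max? count'.values (fun v => v)).getD 0)
        = (PySem.Set.ofList cs).filter
          (fun c => decide ((((p ++ [x]).count c : Nat) : Int) = pvMV cs (p ++ [x]))) := by
      rw [hkm]
      apply List.filter_congr
      intro c _
      rw [hc' c, hmax, pv_beq_decide]
    set MC := (PySem.Set.ofList cs).filter
      (fun c => decide ((((p ++ [x]).count c : Nat) : Int) = pvMV cs (p ++ [x]))) with hMC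
    have hMCsub : ∀ c ∈ MC, c ∈ PySem.Set.ofList cs := fun c hc => (List.mem_filter.mp hc).1
    have hMCnd : MC.Nodup := hK.filter _
    have hstepA : pvStepA (dc, dm) x
        = (count', MC.foldl (fun d c => d.modify c 0 (· + 1)) dm) := by
      simp only [pvStepA]
      rw [← hfilter]
    set dm' := MC.foldl (fun d c => d.modify c 0 (· + 1)) dm with hdm'
    have hkm' : dm'.keys = PySem.Set.ofList cs := by
      rw [hdm', PySem.Dict.keys_foldl_modify, hkm, pv_set_update_of_subset _ _ hMCsub]
    have hvm' : ∀ c, dm'.getD c 0 = pvT cs (p ++ [x]) c := by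
      intro c
      rw [hdm', PySem.Dict.getD_foldl_modify_add_one, hvm c, pvT_append]
      by_cases hmem : c ∈ MC
      · have hcond := (List.mem_filter.mp hmem).2
        simp only [decide_eq_true_eq] at hcond
        rw [List.count_eq_one_of_mem hMCnd hmem, if_pos hcond]
        norm_num
      · rw [List.count_eq_zero_of_not_mem hmem, if_neg]
        · simp
        · intro hcond
          by_cases hcK : c ∈ PySem.Set.ofList cs
          · exact hmem (List.mem_filter.mpr ⟨hcK, by simpa using hcond⟩)
          · have hccs : c ∉ cs := fun h => hcK ((PySem.Set.mem_ofList _ _).mpr h)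
            have hc0 : (p ++ [x]).count c = 0 := by
              apply List.count_eq_zero_of_not_mem
              intro hmem2
              apply hccs
              rw [hps]
              rcases List.mem_append.mp hmem2 with h | h
              · exact List.mem_append.mpr (Or.inl h)
              · simp at h; subst h; simp
            have h1 : (1 : Int) ≤ pvMV cs (p ++ [x]) := by
              have := pvMV_pos cs p x hxcs
              have hx1 : 1 ≤ (p ++ [x]).count x := by
                have : x ∈ p ++ [x] := by simp
                exact List.count_pos_iff.mpr this
              omega
            rw [hc0] at hcond
            simp at hcond
            omega
    have hps' : cs = (p ++ [x]) ++ r' := by rw [hps]; simp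
    have := ih (p ++ [x]) hps' count' dm' hkeys' hkm' hc' hvm'
    have hfold : (x :: r').foldl pvStepA (dc, dm) = r'.foldl pvStepA (count', dm') := by
      rw [List.foldl_cons, hstepA]
    rw [hfold]
    refine ⟨this.1, fun c => ?_⟩
    rw [this.2 c]
    congr 1
    simp

def pvMsFrom (cs : List Char) (k : Nat) (r : List Char) : List Int :=
  (List.range r.length).map (fun i => pvMV cs (cs.take (k + i + 1)))

lemma pvMsFrom_cons (cs : List Char) (k : Nat) (x : Char) (r : List Char) :
    pvMsFrom cs k (x :: r)
      = pvMV cs (cs.take (k + 1)) :: pvMsFrom cs (k + 1) r := by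
  unfold pvMsFrom
  rw [List.length_cons, List.range_succ_eq_map, List.map_cons, List.map_map]
  congr 1
  apply List.map_congr_left
  intro i _
  simp only [Function.comp]
  congr 2
  omega

lemma pv_take_step (cs p : List Char) (x : Char) (r' : List Char) (hps : cs = p ++ x :: r') :
    cs.take (p.length + 1) = p ++ [x] := by
  subst hps
  rw [List.take_append]
  simp

lemma pvMsFrom_snoc (cs p : List Char) (x : Char) (r' : List Char) (hps : cs = p ++ x :: r') :
    pvMsFrom cs 0 (p ++ [x]) = pvMsFrom cs 0 p ++ [pvMV cs (p ++ [x])] := by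
  unfold pvMsFrom
  rw [List.length_append, List.length_singleton, List.range_succ, List.map_append, List.map_singleton]
  congr 1
  simp only [Nat.zero_add]
  rw [pv_take_step cs p x r' hps]

lemma pvB1_inv (cs : List Char) : ∀ (r p : List Char), cs = p ++ r →
    ∀ (d : PySem.Dict Char Int) (m : Int) (ms : List Int),
    d.keys = PySem.Set.ofList p → (∀ c, d.getD c 0 = (p.count c : Int)) →
    m = pvMV cs p → ms = pvMsFrom cs 0 p →
    (r.foldl pvStepB1 (d, m, ms)).1.keys = PySem.Set.ofList cs ∧
      (r.foldl pvStepB1 (d, m, ms)).2.2 = pvMsFrom cs 0 cs := by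
  intro r
  induction r with
  | nil =>
    intro p hps d m ms hk hv hm hms
    constructor
    · simpa [hps] using hk
    · simpa [hps] using hms
  | cons x r' ih =>
    intro p hps d m ms hk hv hm hms
    have hxcs : x ∈ cs := by rw [hps]; simp
    set c0 := d.getD x 0 + 1 with hc0
    have hc0v : c0 = (p.count x : Int) + 1 := by rw [hc0, hv x]
    set d' := d.insert x c0 with hd'
    have hk' : d'.keys = PySem.Set.ofList (p ++ [x]) := by
      have hof : PySem.Set.ofList (p ++ [x]) = PySem.Set.add (PySem.Set.ofList p) x := by
        rw [PySem.Set.ofList_eq_foldl, PySem.Set.ofList_eq_foldl, List.foldl_append]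
        rfl
      rw [hof, PySem.Set.add]
      by_cases hmem : x ∈ PySem.Set.ofList p
      · have hcont : d.contains x = true := by
          rw [PySem.Dict.contains_iff_mem_keys, hk]; exact hmem
        rw [hd', PySem.Dict.keys_insert_of_contains d _ hcont, hk]
        simp [PySem.Set.contains, hmem]
      · have hcont : d.contains x = false := by
          rw [Bool.eq_false_iff]
          intro hc
          exact hmem (hk ▸ (PySem.Dict.contains_iff_mem_keys d x).mp hc)
        rw [hd', PySem.Dict.keys_insert_of_not_contains d _ hcont, hk]
        simp [PySem.Set.contains, hmem]
    have hv' : ∀ c, d'.getD c 0 = ((p ++ [x]).count c : Int) := by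
      intro c
      by_cases hcx : c = x
      · subst hcx
        rw [hd', PySem.Dict.getD_insert_self, hc0v]
        simp [List.count_append]
      · rw [hd', PySem.Dict.getD_insert_of_ne _ _ _ hcx, hv c]
        simp [List.count_append, Ne.symm hcx]
    have hm' : (if c0 > m then c0 else m) = pvMV cs (p ++ [x]) := by
      have hmx : (if c0 > m then c0 else m) = max m c0 := by
        split_ifs with h <;> omega
      rw [hmx, pvMV_append cs p x hxcs, ← hm, hc0v]
    have hstep : pvStepB1 (d, m, ms) x = (d', (if c0 > m then c0 else m), ms ++ [if c0 > m then c0 else m]) := rfl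
    have hms' : ms ++ [if c0 > m then c0 else m] = pvMsFrom cs 0 (p ++ [x]) := by
      rw [hms, hm', pvMsFrom_snoc cs p x r' hps]
    have hps' : cs = (p ++ [x]) ++ r' := by rw [hps]; simp
    have := ih (p ++ [x]) hps' d' (if c0 > m then c0 else m) (ms ++ [if c0 > m then c0 else m]) hk' hv' hm' hms'
    rw [List.foldl_cons, hstep]
    exact this

lemma pvB2_inv (cs : List Char) (c : Char) : ∀ (r p : List Char), cs = p ++ r →
    ((r.zip (pvMsFrom cs p.length r)).foldl (pvStepB2 c)
        ((p.count c : Int), pvT cs p c)).2 = pvT cs cs c := by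
  intro r
  induction r with
  | nil =>
    intro p hps
    simp [hps]
  | cons x r' ih =>
    intro p hps
    rw [pvMsFrom_cons, List.zip_cons_cons, List.foldl_cons]
    have htake : cs.take (p.length + 1) = p ++ [x] := pv_take_step cs p x r' hps
    have hstep : pvStepB2 c ((p.count c : Int), pvT cs p c) (x, pvMV cs (cs.take (p.length + 1)))
        = (((p ++ [x]).count c : Int), pvT cs (p ++ [x]) c) := by
      unfold pvStepB2
      rw [htake]
      have hpc : (if x == c then (p.count c : Int) + 1 else (p.count c : Int))
          = ((p ++ [x]).count c : Int) := by
        by_cases hcx : x = c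
        · subst hcx; simp [List.count_append]
        · simp [List.count_append, hcx]
      simp only [hpc]
      rw [pvT_append, pv_beq_decide]
      simp only [decide_eq_true_eq, List.count_append]
      push_cast
      split_ifs with h <;> simp
    rw [hstep]
    have hlen : (p ++ [x]).length = p.length + 1 := by simp
    have := ih (p ++ [x]) (by rw [hps]; simp)
    rw [hlen] at this
    exact this

lemma pv_foldl_enumerate {β : Type} (xs : List Char) (f : β → Char → β) :
    ∀ (s : Int) (a : β),
    (PySem.List.enumerate xs s).foldl (fun st ic => f st ic.2) a = xs.foldl f a := by
  induction xs with
  | nil => intro s a; rfl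
  | cons x t ih =>
    intro s a
    rw [PySem.List.enumerate_cons, List.foldl_cons, List.foldl_cons, ih]

lemma pv_ofList_nodup (l : List Char) (h : l.Nodup) : PySem.Set.ofList l = l := by
  suffices hgen : ∀ (s : PySem.Set Char) (l : List Char), l.Nodup → (∀ x ∈ l, x ∉ s) →
      PySem.Set.update s l = s ++ l by
    simpa using hgen [] l h (by simp)
  intro s l
  induction l generalizing s with
  | nil => intro _ _; simp [PySem.Set.update]
  | cons a t ih =>
    intro hnd hdisj
    rcases List.nodup_cons.mp hnd with ⟨hat, hndt⟩
    have h1 : PySem.Set.update s (a :: t) = PySem.Set.update (PySem.Set.add s a) t := rfl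
    have hadd : PySem.Set.add s a = s ++ [a] := by
      simp [PySem.Set.add, PySem.Set.contains, hdisj a (by simp)]
    rw [h1, hadd, ih (s ++ [a]) hndt]
    · simp
    · intro x hx
      simp only [List.mem_append, List.mem_singleton]
      rintro (h | h)
      · exact hdisj x (List.mem_cons_of_mem _ hx) h
      · exact hat (h ▸ hx)

lemma pv_getD_zero_init (l : List Char) (c : Char) :
    ∀ (d : PySem.Dict Char Int), (∀ c', d.getD c' 0 = 0) →
    (l.foldl (fun d c => d.insert c 0) d).getD c 0 = 0 := by
  induction l with
  | nil => intro d hd; exact hd c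
  | cons a t ih =>
    intro d hd
    rw [List.foldl_cons]
    apply ih
    intro c'
    by_cases h : c' = a
    · subst h; rw [PySem.Dict.getD_insert_self]
    · rw [PySem.Dict.getD_insert_of_ne _ _ _ h]; exact hd c'

lemma pv_foldl_max_zeros (K : List Char) :
    (K.map (fun _ => (0 : Int))).foldl max 0 = 0 := by
  induction K with
  | nil => rfl
  | cons a t ih => simpa using ih

lemma pvMV_nil (cs : List Char) : pvMV cs [] = 0 := by
  unfold pvMV
  rw [show (PySem.Set.ofList cs).map (fun c => (([] : List Char).count c : Int))
      = (PySem.Set.ofList cs).map (fun _ => (0 : Int)) from List.map_congr_left (by simp)]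
  exact pv_foldl_max_zeros _

lemma pvT_nil (cs : List Char) (c : Char) : pvT cs [] c = 0 := rfl

lemma pvA_char (categories : String) :
    find_maximum_maximumcount categories
      = (PySem.List.max? ((PySem.Set.ofList categories.toList).map
          (fun c => pvT categories.toList categories.toList c)) (fun v => v)).getD 0 := by
  unfold find_maximum_maximumcount
  dsimp only
  rw [pv_foldl_enumerate]
  set cs := categories.toList with hcs
  set K := PySem.Set.ofList cs with hKdef
  have hKnd : K.Nodup := PySem.Set.nodup_ofList cs
  set d0 : PySem.Dict Char Int := K.foldl (fun d c => d.insert c 0) PySem.Dict.empty with hd0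
  have hk0 : d0.keys = K := by
    rw [hd0, PySem.Dict.keys_foldl_insert K (fun _ _ => 0) PySem.Dict.empty,
      PySem.Dict.keys_empty]
    have : PySem.Set.update ([] : PySem.Set Char) K = PySem.Set.ofList K := by
      rw [PySem.Set.ofList_eq_foldl]; rfl
    rw [this, pv_ofList_nodup K hKnd]
  have hv0 : ∀ c, d0.getD c 0 = ((([] : List Char).count c : Nat) : Int) := by
    intro c
    rw [hd0]
    simp [pv_getD_zero_init K c PySem.Dict.empty (fun c' => PySem.Dict.getD_empty c' 0)]
  have hT0 : ∀ c, d0.getD c 0 = pvT cs [] c := by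
    intro c; rw [hv0 c, pvT_nil]; simp
  obtain ⟨hkF, hvF⟩ := pvA_inv cs cs [] (by simp) d0 d0 hk0 hk0 hv0 hT0
  rw [PySem.Dict.values_eq_map_keys _ (by rw [hkF]; exact hKnd) 0, hkF]
  congr 1
  congr 1
  apply List.map_congr_left
  intro c _
  rw [hvF c]
  simp

lemma pvB_char (categories : String) :
    find_maximum_maximumcount_alt categories
      = (PySem.List.max? ((PySem.Set.ofList categories.toList).map
          (fun c => pvT categories.toList categories.toList c)) (fun v => v)).getD 0 := by
  unfold find_maximum_maximumcount_alt
  dsimp only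
  set cs := categories.toList with hcs
  have hinit : (PySem.Dict.empty : PySem.Dict Char Int).keys = PySem.Set.ofList ([] : List Char) := by
    rw [PySem.Dict.keys_empty]; rfl
  obtain ⟨hkF, hmsF⟩ := pvB1_inv cs cs [] (by simp) PySem.Dict.empty 0 [] hinit
    (fun c => by simp [PySem.Dict.getD_empty]) (pvMV_nil cs).symm rfl
  rw [hkF, hmsF]
  congr 1
  congr 1
  apply List.map_congr_left
  intro c _
  have := pvB2_inv cs c cs [] (by simp)
  simpa [pvTallyB, pvT_nil] using this

-- ===== VERDICT (by name: the statement is the Claim_ definition above) =====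
theorem find_maximum_maximumcount_spec : Claim_equal_find_maximum_maximumcount := by
  intro categories _ _
  unfold Spec_find_maximum_maximumcount
  rw [pvA_char categories, pvB_char categories]
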